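-- pv_equiv track=rewrite | github.com/milanhorvatovic/skill-system-foundry | skill-system-foundry/scripts/lib/manifest.py | _find_group_end
-- ===== SOURCE A (Python) =====
-- def _find_group_end(lines: list[str], group_idx: int) -> int:
--     """Return the insert position after the last entry in a group."""
--     last_content = group_idx
--     group_indent = len(lines[group_idx]) - len(lines[group_idx].lstrip())
--     i = group_idx + 1
--     while i < len(lines):
--         line = lines[i]
--         if line.strip() == "":
--             i += 1
--             continue
--         # Group entries are indented more than the group key.
--         indent = len(line) - len(line.lstrip())
--         if indent <= group_indent:
--             break
--         last_content = i
--         i += 1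
--     return last_content + 1
-- ===== SOURCE B (Python) =====
-- def _find_group_end(lines: list[str], group_idx: int) -> int:
--     """Return the insert position after the last entry in a group."""
--     key = lines[group_idx]
--     group_indent = len(key) - len(key.lstrip())
--     n = len(lines)
--     # Phase 1: find the group's boundary: first non-blank line at indent <= group_indent.
--     end = group_idx + 1
--     while end < n:
--         line = lines[end]
--         if line.strip() != "" and len(line) - len(line.lstrip()) <= group_indent:
--             break
--         end += 1
--     # Phase 2: trim trailing blank lines back to the last content line.
--     j = end - 1
--     while j > group_idx:
--         if lines[j].strip() != "":
--             return j + 1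
--         j -= 1
--     return group_idx + 1
-- ===== Notes on version B (the rewrite author's own statement) =====
-- stated objective: alternative
-- what changed: B decomposes the task into two scans - a forward scan that finds the group boundary, then a backward scan that trims trailing blank lines - instead of A's single scan that tracks a last_content index inline.
import Mathlib
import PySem

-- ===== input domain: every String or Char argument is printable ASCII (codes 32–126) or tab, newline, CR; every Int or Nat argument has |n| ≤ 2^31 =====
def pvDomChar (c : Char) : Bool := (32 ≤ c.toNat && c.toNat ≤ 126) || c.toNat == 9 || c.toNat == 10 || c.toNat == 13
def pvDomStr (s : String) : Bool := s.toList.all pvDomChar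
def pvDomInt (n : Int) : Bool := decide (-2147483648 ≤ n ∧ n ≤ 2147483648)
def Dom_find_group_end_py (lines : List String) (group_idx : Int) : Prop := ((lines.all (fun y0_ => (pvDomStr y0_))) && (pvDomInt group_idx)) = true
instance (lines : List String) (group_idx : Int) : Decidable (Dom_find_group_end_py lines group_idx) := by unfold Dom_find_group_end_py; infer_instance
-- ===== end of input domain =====

-- B splits A's single scan (which tracks last_content inline) into a forward boundary
-- scan followed by a backward trailing-blank trim; same O(n) cost, different decomposition.
-- Pre_ excludes exactly the inputs where Python A raises IndexError on lines[group_idx].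

-- ===== PORT A =====
-- indent of a line: len(line) - len(line.lstrip())
def pvIndent (s : String) : Int :=
  (PySem.Str.len s : Int) - (PySem.Str.len (PySem.Str.lstrip s) : Int)

-- A's while loop; fuel = number of remaining values of i with i < len(lines).
def pvALoop (lines : List String) (group_indent : Int) : Int → Int → Nat → Int
  | last, _, 0 => last
  | last, i, fuel + 1 =>
    let line := PySem.List.pyGetD lines i ""
    if PySem.Str.strip line = "" then pvALoop lines group_indent last (i + 1) fuel
    else if pvIndent line ≤ group_indent then last
    else pvALoop lines group_indent i (i + 1) fuel

def find_group_end_py (lines : List String) (group_idx : Int) : Int :=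
  match PySem.List.pyGet? lines group_idx with
  | none => 0  -- Python raises IndexError here; excluded by Pre_
  | some key =>
    let group_indent := pvIndent key
    pvALoop lines group_indent group_idx (group_idx + 1)
      ((lines.length - (group_idx + 1)).toNat) + 1

-- ===== PORT B =====
-- Phase 1: forward scan for the boundary; fuel = remaining values of end with end < n.
def pvBFwd (lines : List String) (group_indent : Int) : Int → Nat → Int
  | e, 0 => e
  | e, fuel + 1 =>
    let line := PySem.List.pyGetD lines e ""
    if PySem.Str.strip line ≠ "" ∧ pvIndent line ≤ group_indent then e
    else pvBFwd lines group_indent (e + 1) fuel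

-- Phase 2: backward trim of blank lines; fuel = remaining values of j with j > group_idx.
def pvBBwd (lines : List String) (group_idx : Int) : Int → Nat → Int
  | _, 0 => group_idx + 1
  | j, fuel + 1 =>
    if PySem.Str.strip (PySem.List.pyGetD lines j "") ≠ "" then j + 1
    else pvBBwd lines group_idx (j - 1) fuel

def find_group_end_py_alt (lines : List String) (group_idx : Int) : Int :=
  match PySem.List.pyGet? lines group_idx with
  | none => 0  -- Python raises IndexError here; excluded by Pre_
  | some key =>
    let group_indent := pvIndent key
    let e := pvBFwd lines group_indent (group_idx + 1)
      ((lines.length - (group_idx + 1)).toNat)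
    pvBBwd lines group_idx (e - 1) ((e - 1 - group_idx).toNat)

-- ===== PRECONDITION & SPEC =====
-- Pre_ excludes exactly the inputs on which Python A raises IndexError (group_idx out of range).
def Pre_find_group_end_py (lines : List String) (group_idx : Int) : Prop :=
  PySem.Raise.InRange lines.length group_idx
instance (lines : List String) (group_idx : Int) : Decidable (Pre_find_group_end_py lines group_idx) := by unfold Pre_find_group_end_py; infer_instance

def pvWitness_find_group_end_py : List String × Int := (["grp:", "  a", "", "  b"], 0)

def Spec_find_group_end_py (lines : List String) (group_idx : Int) (out : Int) : Prop := out = find_group_end_py_alt lines group_idx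
instance (lines : List String) (group_idx : Int) (out : Int) : Decidable (Spec_find_group_end_py lines group_idx out) := by unfold Spec_find_group_end_py; infer_instance

-- ===== CLAIM (what is proved, stated in full; the proofs are below) =====
def Claim_equal_find_group_end_py : Prop := ∀ (lines : List String) (group_idx : Int), Dom_find_group_end_py lines group_idx → Pre_find_group_end_py lines group_idx → Spec_find_group_end_py lines group_idx (find_group_end_py lines group_idx)

-- ===== LEMMAS AND PROOFS =====

-- Forward scan never moves left.
theorem pvBFwd_ge (lines : List String) (g : Int) :
    ∀ (fuel : Nat) (e : Int), e ≤ pvBFwd lines g e fuel := by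
  intro fuel
  induction fuel with
  | zero => intro e; simp [pvBFwd]
  | succ n ih =>
    intro e
    simp only [pvBFwd]
    split
    · exact le_refl _
    · exact le_trans (by omega) (ih (e + 1))

-- Dropping the last (deepest) backward step is free when that position is blank.
theorem pvBBwd_blank (lines : List String) (lo : Int) :
    ∀ (k : Nat) (j : Int), PySem.Str.strip (PySem.List.pyGetD lines (j - k) "") = "" →
      pvBBwd lines lo j (k + 1) = pvBBwd lines lo j k := by
  intro k
  induction k with
  | zero =>
    intro j h
    simp only [pvBBwd]
    rw [if_neg]
    simp only [Int.natCast_zero, Int.sub_zero] at h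
    simp [h]
  | succ n ih =>
    intro j h
    simp only [pvBBwd]
    split
    · rfl
    · apply ih
      have : j - 1 - (n : Int) = j - ((n : Nat) + 1 : Nat) := by push_cast; ring
      rw [this]; exact h

-- When the last backward step hits a non-blank line, it pins the default.
theorem pvBBwd_content (lines : List String) (lo lo' : Int) :
    ∀ (k : Nat) (j : Int), PySem.Str.strip (PySem.List.pyGetD lines (j - k) "") ≠ "" →
      j - k = lo' →
      pvBBwd lines lo j (k + 1) = pvBBwd lines lo' j k := by
  intro k
  induction k with
  | zero =>
    intro j h he
    simp only [Int.natCast_zero, Int.sub_zero] at h he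
    simp only [pvBBwd]
    rw [if_pos h, he]
  | succ n ih =>
    intro j h he
    simp only [pvBBwd]
    split
    · rfl
    · apply ih
      · have : j - 1 - (n : Int) = j - ((n : Nat) + 1 : Nat) := by push_cast; ring
        rw [this]; exact h
      · push_cast at he ⊢; omega

-- The key invariant: A's loop (plus one) equals forward-boundary then backward-trim.
theorem pvLoop_eq (lines : List String) (g : Int) :
    ∀ (fuel : Nat) (i last : Int),
      pvALoop lines g last i fuel + 1 =
        pvBBwd lines last (pvBFwd lines g i fuel - 1)
          ((pvBFwd lines g i fuel - i).toNat) := by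
  intro fuel
  induction fuel with
  | zero => intro i last; simp [pvALoop, pvBFwd, pvBBwd]
  | succ n ih =>
    intro i last
    simp only [pvALoop, pvBFwd]
    by_cases hb : PySem.Str.strip (PySem.List.pyGetD lines i "") = ""
    · rw [if_pos hb, if_neg (by simp [hb])]
      have hge : i + 1 ≤ pvBFwd lines g (i + 1) n := pvBFwd_ge lines g n (i + 1)
      set e := pvBFwd lines g (i + 1) n with he
      have h1 : (e - i).toNat = (e - (i + 1)).toNat + 1 := by omega
      rw [h1, pvBBwd_blank lines last ((e - (i + 1)).toNat) (e - 1)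
        (by rw [show (e - 1) - ((e - (i + 1)).toNat : Int) = i by omega]; exact hb)]
      exact ih (i + 1) last
    · rw [if_neg hb]
      by_cases hi : pvIndent (PySem.List.pyGetD lines i "") ≤ g
      · rw [if_pos hi, if_pos ⟨hb, hi⟩]
        simp [pvBBwd]
      · rw [if_neg hi, if_neg (by intro h; exact hi h.2)]
        have hge : i + 1 ≤ pvBFwd lines g (i + 1) n := pvBFwd_ge lines g n (i + 1)
        set e := pvBFwd lines g (i + 1) n with he
        have h1 : (e - i).toNat = (e - (i + 1)).toNat + 1 := by omega
        rw [h1, pvBBwd_content lines last i ((e - (i + 1)).toNat) (e - 1)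
          (by rw [show (e - 1) - ((e - (i + 1)).toNat : Int) = i by omega]; exact hb)
          (by omega)]
        exact ih (i + 1) i

-- ===== VERDICT (by name: the statement is the Claim_ definition above) =====
theorem find_group_end_py_spec : Claim_equal_find_group_end_py := by
  intro lines group_idx _ hpre
  unfold Spec_find_group_end_py find_group_end_py find_group_end_py_alt
  obtain ⟨key, hk⟩ : ∃ k, PySem.List.pyGet? lines group_idx = some k := by
    rcases h : PySem.List.pyGet? lines group_idx with _ | k
    · exact absurd ((PySem.List.pyGet?_eq_none_iff lines group_idx).mp h) (not_not_intro hpre)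
    · exact ⟨k, rfl⟩
  rw [hk]
  have := pvLoop_eq lines (pvIndent key)
    ((lines.length - (group_idx + 1)).toNat) (group_idx + 1) group_idx
  rw [show pvBFwd lines (pvIndent key) (group_idx + 1)
        ((lines.length - (group_idx + 1)).toNat) - (group_idx + 1)
      = pvBFwd lines (pvIndent key) (group_idx + 1)
        ((lines.length - (group_idx + 1)).toNat) - 1 - group_idx by ring] at this
  exact this
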